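-- pv_equiv track=rewrite | github.com/pepkit/geofetch | geofetch/utils.py | gse_content_to_dict
-- ===== SOURCE A (Python) =====
-- from typing import Dict, List, NoReturn, Union
--
-- def _sanitize_config_string(text: str) -> str:
--     """Sanitize text in config file.
--
--     Args:
--         text: Any string that have to be sanitized.
--
--     Returns:
--         Sanitized strings.
--     """
--     new_str = text
--     new_str = new_str.replace('"', '\\"')
--     new_str = new_str.replace("'", "''")
--     return new_str
--
-- def _sanitize_name(name_str: str) -> str:
--     """Sanitize strings by replacing all odd characters.
--
--     Args:
--         name_str: Any string value that has to be sanitized.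
--
--     Returns:
--         Sanitized strings.
--     """
--     new_str = name_str
--     punctuation1 = r"""!"#$%&'()*,./:;<=>?@[\]^_`{|}~"""
--     for odd_char in list(punctuation1):
--         new_str = new_str.replace(odd_char, "_")
--     new_str = new_str.replace(" ", "_").replace("__", "_").lower()
--     return new_str
--
-- def gse_content_to_dict(gse_content: List[str]) -> Dict[str, dict]:
--     """Unpack gse soft file to dict.
--
--     Args:
--         gse_content: List of strings of gse soft file.
--
--     Returns:
--         Dict of gse content.
--     """
--     gse_dict = {}
--     for line in gse_content:
--         if line.startswith("^"):
--             pass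
--         elif line.startswith("!"):
--             key_value = line.split(" = ")
--             new_key = _sanitize_name(key_value[0][1:])
--             new_value = _sanitize_config_string(" ".join(key_value[1:]))
--             if new_key in gse_dict.keys():
--                 gse_dict[new_key] = f"{gse_dict[new_key]} + {new_value}"
--             else:
--                 gse_dict[new_key] = new_value
--
--     return {"experiment_metadata": gse_dict}
-- ===== SOURCE B (Python) =====
-- def _sanitize_config_string(text: str) -> str:
--     new_str = text
--     new_str = new_str.replace('"', '\\"')
--     new_str = new_str.replace("'", "''")
--     return new_str
--
-- def _sanitize_name(name_str: str) -> str: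
--     new_str = name_str
--     punctuation1 = r"""!"#$%&'()*,./:;<=>?@[\]^_`{|}~"""
--     for odd_char in list(punctuation1):
--         new_str = new_str.replace(odd_char, "_")
--     new_str = new_str.replace(" ", "_").replace("__", "_").lower()
--     return new_str
--
-- def gse_content_to_dict(gse_content):
--     """Gather-then-group: extract all (key, value) pairs, list the distinct
--     keys in first-occurrence order, then join each key's values in one go."""
--     pairs = [
--         (_sanitize_name(line.split(" = ")[0][1:]),
--          _sanitize_config_string(" ".join(line.split(" = ")[1:])))
--         for line in gse_content
--         if line.startswith("!")
--     ]
--     keys = list(dict.fromkeys(k for k, _ in pairs))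
--     meta = {k: " + ".join(v for k2, v in pairs if k2 == k) for k in keys}
--     return {"experiment_metadata": meta}
-- ===== Notes on version B (the rewrite author's own statement) =====
-- stated objective: alternative
-- what changed: Replaces A's single-pass dict accumulation (membership test + string concatenation per line) by a gather-then-group algorithm: a comprehension extracts all (key, value) pairs, dict.fromkeys lists the distinct keys in first-occurrence order, and the result maps each distinct key to the join of the values a filter over the pair list selects for it.
import Mathlib
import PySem

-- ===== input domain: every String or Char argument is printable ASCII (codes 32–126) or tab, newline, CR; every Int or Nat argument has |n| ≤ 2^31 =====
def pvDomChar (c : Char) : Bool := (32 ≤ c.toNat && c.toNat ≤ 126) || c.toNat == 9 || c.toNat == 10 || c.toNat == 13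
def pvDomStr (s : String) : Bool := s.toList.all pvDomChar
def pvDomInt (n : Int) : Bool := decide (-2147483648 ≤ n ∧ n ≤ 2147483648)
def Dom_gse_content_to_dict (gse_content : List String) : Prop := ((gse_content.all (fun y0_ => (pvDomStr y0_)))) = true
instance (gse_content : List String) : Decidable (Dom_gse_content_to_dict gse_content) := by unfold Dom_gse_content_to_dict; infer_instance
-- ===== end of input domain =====

-- B replaces A's single-pass dict accumulation (membership test + concatenation per line)
-- by gather-then-group: extract all (key, value) pairs, dedup the keys, join each key's
-- filtered values once; equal return value, no speed claim.

-- ===== PORT A =====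
-- shared per-line helpers: the sanitising is IDENTICAL in A and B (B keeps them unchanged)
def pvSanitizeConfigString (text : String) : String :=
  PySem.Str.replace (PySem.Str.replace text "\"" "\\\"") "'" "''"

def pvPunct : List Char := "!\"#$%&'()*,./:;<=>?@[\\]^_`{|}~".toList

def pvSanitizeName (name_str : String) : String :=
  let s := pvPunct.foldl (fun s c => PySem.Str.replace s (String.ofList [c]) "_") name_str
  PySem.Str.lower (PySem.Str.replace (PySem.Str.replace s " " "_") "__" "_")

-- key_value = line.split(" = "); new_key / new_value as in the Python.
-- split? with a non-empty separator is always `some` and never returns [], so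
-- `.getD []` / `.headD ""` are exact for `key_value` / `key_value[0]`.
def pvLineKV (line : String) : String × String :=
  let kv := (PySem.Str.split? line " = ").getD []
  (pvSanitizeName (PySem.Str.slice (kv.headD "") (some 1) none),
   pvSanitizeConfigString (PySem.Str.join " " (PySem.List.slice kv (some 1) none)))

def gse_content_to_dict (gse_content : List String) : List (String × List (String × String)) :=
  let gse_dict := gse_content.foldl (fun gse_dict line =>
    if PySem.Str.startswith line "^" then gse_dict
    else if PySem.Str.startswith line "!" then
      let kv := pvLineKV line
      if gse_dict.contains kv.1 then
        -- gse_dict[new_key] exists here (contains), so getD is exact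
        gse_dict.insert kv.1 (gse_dict.getD kv.1 "" ++ " + " ++ kv.2)
      else
        gse_dict.insert kv.1 kv.2
    else gse_dict) PySem.Dict.empty
  [("experiment_metadata", gse_dict.items)]

-- ===== PORT B =====
def gse_content_to_dict_alt (gse_content : List String) : List (String × List (String × String)) :=
  -- pairs = [(new_key, new_value) for line in gse_content if line.startswith("!")]
  let pairs := (gse_content.filter (fun l => PySem.Str.startswith l "!")).map pvLineKV
  -- keys = list(dict.fromkeys(k for k, _ in pairs))
  let keys := PySem.List.dedup (pairs.map (fun p => p.1))
  -- meta = {k: " + ".join(v for k2, v in pairs if k2 == k) for k in keys}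
  let md := keys.foldl (fun d k =>
    d.insert k (PySem.Str.join " + " ((pairs.filter (fun p => p.1 == k)).map (fun p => p.2))))
    PySem.Dict.empty
  [("experiment_metadata", md.items)]

-- ===== PRECONDITION & SPEC =====
def Spec_gse_content_to_dict (gse_content : List String) (out : List (String × List (String × String))) : Prop := out = gse_content_to_dict_alt gse_content
instance (gse_content : List String) (out : List (String × List (String × String))) : Decidable (Spec_gse_content_to_dict gse_content out) := by unfold Spec_gse_content_to_dict; infer_instance

-- ===== CLAIM (what is proved, stated in full; the proofs are below) =====
def Claim_equal_gse_content_to_dict : Prop := ∀ (gse_content : List String), Dom_gse_content_to_dict gse_content → Spec_gse_content_to_dict gse_content (gse_content_to_dict gse_content)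

-- ===== LEMMAS AND PROOFS =====

-- the ('!'-line -> (key, value)) pairs both programs process, in order
def pvPairs (gc : List String) : List (String × String) :=
  (gc.filter (fun l => PySem.Str.startswith l "!")).map pvLineKV

lemma pvPairs_cons_bang (l : String) (gc : List String)
    (h : PySem.Str.startswith l "!" = true) :
    pvPairs (l :: gc) = pvLineKV l :: pvPairs gc := by
  simp [PySem.Str.startswith_eq] at h
  simp [pvPairs, h]

lemma pvPairs_cons_other (l : String) (gc : List String)
    (h : PySem.Str.startswith l "!" = false) :
    pvPairs (l :: gc) = pvPairs gc := by
  simp [PySem.Str.startswith_eq] at h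
  simp [pvPairs, h]

lemma hat_not_bang (l : String) (h : PySem.Str.startswith l "^" = true) :
    PySem.Str.startswith l "!" = false := by
  rw [PySem.Str.startswith_eq, PySem.Chars.startswith_iff] at h
  by_contra hcon
  rw [Bool.not_eq_false, PySem.Str.startswith_eq, PySem.Chars.startswith_iff] at hcon
  rcases h with ⟨t, ht⟩
  rcases hcon with ⟨u, hu⟩
  have heq : "^".toList ++ t = "!".toList ++ u := ht.trans hu.symm
  simp at heq

-- A's loop over the lines is its accumulation loop over pvPairs
lemma foldA_pairs (gc : List String) (d : PySem.Dict String String) :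
    gc.foldl (fun gse_dict line =>
      if PySem.Str.startswith line "^" then gse_dict
      else if PySem.Str.startswith line "!" then
        let kv := pvLineKV line
        if gse_dict.contains kv.1 then
          gse_dict.insert kv.1 (gse_dict.getD kv.1 "" ++ " + " ++ kv.2)
        else
          gse_dict.insert kv.1 kv.2
      else gse_dict) d
    = (pvPairs gc).foldl
        (fun d p => d.insert p.1
          (if d.contains p.1 then d.getD p.1 "" ++ " + " ++ p.2 else p.2)) d := by
  induction gc generalizing d with
  | nil => rfl
  | cons l gc ih =>
    by_cases h1 : PySem.Str.startswith l "^" = true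
    · rw [pvPairs_cons_other l gc (hat_not_bang l h1), List.foldl_cons, if_pos h1, ih]
    · by_cases h2 : PySem.Str.startswith l "!" = true
      · rw [pvPairs_cons_bang l gc h2, List.foldl_cons, List.foldl_cons, if_neg h1,
          if_pos h2, ih]
        congr 1
        by_cases h3 : (PySem.Dict.contains d (pvLineKV l).1) = true
        · simp [h3]
        · simp [h3]
      · rw [pvPairs_cons_other l gc (by rwa [Bool.not_eq_true] at h2), List.foldl_cons,
          if_neg h1, if_neg h2, ih]

def pvComb (o : Option String) (v : String) : String :=
  match o with
  | none => v
  | some s => s ++ " + " ++ v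

-- lookup in A's accumulated dict = a fold of pvComb over the key's filtered values
lemma getA (P : List (String × String)) (d : PySem.Dict String String) (c : String) :
    (P.foldl (fun d p => d.insert p.1
        (if d.contains p.1 then d.getD p.1 "" ++ " + " ++ p.2 else p.2)) d).get? c
      = ((P.filter (fun p => p.1 == c)).map (fun p => p.2)).foldl
          (fun o v => some (pvComb o v)) (d.get? c) := by
  induction P generalizing d with
  | nil => rfl
  | cons p P ih =>
    simp only [List.foldl_cons, List.filter_cons]
    rw [ih]
    by_cases hc : p.1 = c
    · subst hc
      simp only [beq_self_eq_true, if_true, List.map_cons, List.foldl_cons]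
      congr 1
      rw [PySem.Dict.get?_insert, if_pos rfl]
      rw [PySem.Dict.contains_eq_isSome_get?, PySem.Dict.getD_eq_get?_getD]
      cases d.get? p.1 <;> simp [pvComb]
    · have hbeq : (p.1 == c) = false := by simp [hc]
      simp only [hbeq, Bool.false_eq_true, if_false]
      congr 1
      rw [PySem.Dict.get?_insert, if_neg (fun h => hc h.symm)]

lemma g_some (vs : List String) (s : String) :
    vs.foldl (fun o v => some (pvComb o v)) (some s)
      = some (vs.foldl (fun s v => s ++ " + " ++ v) s) := by
  induction vs generalizing s with
  | nil => rfl
  | cons v vs ih => exact ih (s ++ " + " ++ v)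

lemma join_glue (v w : String) (vs : List String) :
    PySem.Str.join " + " ((v ++ " + " ++ w) :: vs)
      = v ++ " + " ++ PySem.Str.join " + " (w :: vs) := by
  apply String.toList_inj.mp
  cases vs with
  | nil =>
    simp [PySem.Str.toList_join, PySem.Chars.join_singleton]
  | cons u vs =>
    simp [PySem.Str.toList_join, PySem.Chars.join_cons_cons, List.append_assoc]

lemma foldcat_join (vs : List String) (v : String) :
    vs.foldl (fun s w => s ++ " + " ++ w) v = PySem.Str.join " + " (v :: vs) := by
  induction vs generalizing v with
  | nil =>
    apply String.toList_inj.mp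
    simp [PySem.Str.toList_join, PySem.Chars.join_singleton]
  | cons w vs ih =>
    simp only [List.foldl_cons]
    rw [ih, join_glue]
    apply String.toList_inj.mp
    simp [PySem.Str.toList_join, PySem.Chars.join_cons_cons, List.append_assoc]

lemma g_join (vs : List String) (h : vs ≠ []) :
    vs.foldl (fun o v => some (pvComb o v)) none = some (PySem.Str.join " + " vs) := by
  cases vs with
  | nil => exact absurd rfl h
  | cons v vs =>
    have hg := g_some vs v
    rw [foldcat_join] at hg
    exact hg

-- A's accumulated dict has the same items as B's per-key join dict
lemma main_items (P : List (String × String)) :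
    (P.foldl (fun d p => d.insert p.1
        (if d.contains p.1 then d.getD p.1 "" ++ " + " ++ p.2 else p.2))
        PySem.Dict.empty).items
      = ((PySem.List.dedup (P.map (fun p => p.1))).foldl (fun d k =>
            d.insert k (PySem.Str.join " + " ((P.filter (fun p => p.1 == k)).map (fun p => p.2))))
          PySem.Dict.empty).items := by
  set dA := P.foldl (fun d p => d.insert p.1
      (if d.contains p.1 then d.getD p.1 "" ++ " + " ++ p.2 else p.2))
      PySem.Dict.empty with hdA
  set keys := PySem.List.dedup (P.map (fun p => p.1)) with hkeysdef
  have hkeysOf : keys = PySem.Set.ofList (P.map (fun p => p.1)) := by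
    simp [hkeysdef]
  have hkeysNodup : keys.Nodup := by
    rw [hkeysOf]; exact PySem.Set.nodup_ofList _
  have hANodup : dA.keys.Nodup := by
    rw [hdA]
    exact PySem.Dict.nodup_keys_foldl_insert_key P (fun p => p.1)
      (fun d p => if d.contains p.1 then d.getD p.1 "" ++ " + " ++ p.2 else p.2) _
      (by simp [PySem.Dict.keys_empty])
  have hAkeys : dA.keys = keys := by
    rw [hdA,
      PySem.Dict.keys_foldl_insert_key P (fun p => p.1)
        (fun d p => if d.contains p.1 then d.getD p.1 "" ++ " + " ++ p.2 else p.2),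
      hkeysOf]
    rfl
  -- B's fold inserts fresh distinct keys, so its items list is the plain map
  have hB : ((keys.foldl (fun d k =>
        d.insert k (PySem.Str.join " + " ((P.filter (fun p => p.1 == k)).map (fun p => p.2))))
        (PySem.Dict.empty : PySem.Dict String String)).items)
      = keys.map (fun k =>
          (k, PySem.Str.join " + " ((P.filter (fun p => p.1 == k)).map (fun p => p.2)))) := by
    have := PySem.Dict.items_foldl_insert_fresh keys (fun k => k)
      (fun k => PySem.Str.join " + " ((P.filter (fun p => p.1 == k)).map (fun p => p.2)))
      PySem.Dict.empty
      (by intro a _; simp [PySem.Dict.contains_empty])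
      (by simpa using hkeysNodup)
    simpa using this
  rw [hB, PySem.Dict.items_eq_map_keys dA hANodup "", hAkeys]
  apply List.map_congr_left
  intro k hk
  have hmem : k ∈ P.map (fun p => p.1) := by
    rw [hkeysOf] at hk
    exact (PySem.Set.mem_ofList _ _).mp hk
  have hne : (P.filter (fun p => p.1 == k)).map (fun p => p.2) ≠ [] := by
    rcases List.mem_map.mp hmem with ⟨p, hp, hpk⟩
    intro hnil
    have : p ∈ P.filter (fun p => p.1 == k) := List.mem_filter.mpr ⟨hp, by simp [hpk]⟩
    simp [List.map_eq_nil_iff.mp hnil] at this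
  congr 1
  rw [PySem.Dict.getD_eq_get?_getD, hdA, getA, PySem.Dict.get?_empty, g_join _ hne]
  rfl

-- ===== VERDICT (by name: the statement is the Claim_ definition above) =====
theorem gse_content_to_dict_spec : Claim_equal_gse_content_to_dict := by
  intro gc _
  unfold Spec_gse_content_to_dict gse_content_to_dict gse_content_to_dict_alt
  rw [foldA_pairs]
  exact congrArg (fun ls => [("experiment_metadata", ls)]) (main_items (pvPairs gc))
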